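-- pv_equiv track=rewrite | github.com/miliar/Code_Jam_Webscraper | solutions_python/solutions_year17_round1_nr1/296.py | solve_line_first
-- ===== SOURCE A (Python) =====
-- def solve_line_first(l):
--     prev = '?'
--     s = ''
--     for c in l:
--         if c == '?':
--             s += prev
--         else:
--             s += c
--             prev = c
--     return s
-- ===== SOURCE B (Python) =====
-- import re
--
-- def solve_line_first(l):
--     # each non-'?' anchor plus its following run of '?'s becomes the anchor
--     # repeated over the whole run; leading '?'s match nothing and stay as-is
--     return re.sub(r'[^?]\?*', lambda m: m.group(0)[0] * len(m.group(0)), l)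
-- ===== Notes on version B (the rewrite author's own statement) =====
-- stated objective: idiomatic
-- what changed: Replaces the per-character carry loop (prev variable, string concatenation) by a single regex substitution that locates each non-'?' anchor with its following run of '?'s and expands it to the anchor repeated over the run.
import Mathlib
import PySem

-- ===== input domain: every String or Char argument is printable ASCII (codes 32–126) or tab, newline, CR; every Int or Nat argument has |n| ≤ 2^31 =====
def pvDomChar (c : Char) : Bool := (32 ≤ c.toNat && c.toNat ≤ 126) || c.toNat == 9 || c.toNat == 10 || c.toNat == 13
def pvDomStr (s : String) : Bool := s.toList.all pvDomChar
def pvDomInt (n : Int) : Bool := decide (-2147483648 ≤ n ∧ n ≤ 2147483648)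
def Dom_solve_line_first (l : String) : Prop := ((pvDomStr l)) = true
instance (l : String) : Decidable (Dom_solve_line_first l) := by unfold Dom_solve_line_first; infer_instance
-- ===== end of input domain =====

-- B replaces A's per-character carry loop by group expansion: each non-'?' anchor
-- together with its run of following '?'s is emitted as the anchor repeated (idiomatic regex sub in Python).

-- ===== PORT A =====
-- the loop state is (prev, s); each char appends to s and possibly updates prev
def solve_line_first (l : String) : String :=
  (l.toList.foldl
    (fun (st : Char × List Char) c =>
      if c = '?' then (st.1, st.2 ++ [st.1]) else (c, st.2 ++ [c]))
    ('?', [])).2 |> String.ofList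

-- ===== PORT B =====
-- hand-port of re.sub scanning with pattern [^?]\?*: an unmatched char ('?') is
-- copied; at a non-'?' char the match grabs the following run of '?'s and the
-- replacer emits the anchor repeated over the whole match.
def pvBGo (l : List Char) : List Char :=
  match l with
  | [] => []
  | c :: rest =>
    if c = '?' then c :: pvBGo rest
    else
      let q := rest.takeWhile (· = '?')
      List.replicate (q.length + 1) c ++ pvBGo (rest.drop q.length)
termination_by l.length
decreasing_by
  all_goals simp [List.length_drop]

def solve_line_first_alt (l : String) : String := String.ofList (pvBGo l.toList)

-- ===== PRECONDITION & SPEC =====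
def Spec_solve_line_first (l : String) (out : String) : Prop := out = solve_line_first_alt l
instance (l : String) (out : String) : Decidable (Spec_solve_line_first l out) := by unfold Spec_solve_line_first; infer_instance

-- ===== CLAIM (what is proved, stated in full; the proofs are below) =====
def Claim_equal_solve_line_first : Prop := ∀ (l : String), Dom_solve_line_first l → Spec_solve_line_first l (solve_line_first l)

-- ===== LEMMAS AND PROOFS =====

-- pvG p xs: A's loop output given current prev = p (proof-side characterisation)
def pvG (p : Char) : List Char → List Char
  | [] => []
  | c :: r => if c = '?' then p :: pvG p r else c :: pvG c r

theorem pvFold_eq_g (xs : List Char) (p : Char) (acc : List Char) :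
    (xs.foldl
      (fun (st : Char × List Char) c =>
        if c = '?' then (st.1, st.2 ++ [st.1]) else (c, st.2 ++ [c]))
      (p, acc)).2 = acc ++ pvG p xs := by
  induction xs generalizing p acc with
  | nil => simp [pvG]
  | cons c r ih =>
    by_cases h : c = '?' <;> simp [pvG, h, ih]

theorem pvG_anchor (c : Char) (xs : List Char) :
    pvG c xs = List.replicate (xs.takeWhile (· = '?')).length c
      ++ pvG c (xs.dropWhile (· = '?')) := by
  induction xs with
  | nil => simp [pvG]
  | cons d r ih =>
    by_cases h : d = '?'
    · simp [pvG, h, List.takeWhile, List.dropWhile, List.replicate_succ, ih]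
    · simp [pvG, List.takeWhile, List.dropWhile, h]

theorem pvDrop_takeWhile (p : Char → Bool) (r : List Char) :
    r.drop (r.takeWhile p).length = r.dropWhile p := by
  induction r with
  | nil => rfl
  | cons d t ih =>
    by_cases h : p d <;> simp [List.takeWhile, List.dropWhile, h, ih]

-- pvG does not depend on prev when the list does not start with '?'
theorem pvG_indep (p q : Char) (ys : List Char) (h : ys.head? ≠ some '?') :
    pvG p ys = pvG q ys := by
  cases ys with
  | nil => rfl
  | cons d t =>
    have hd : d ≠ '?' := by intro hd; exact h (by simp [hd])
    simp [pvG, hd]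

theorem pvG_eq_bGo (xs : List Char) : pvG '?' xs = pvBGo xs := by
  induction hn : xs.length using Nat.strong_induction_on generalizing xs with
  | _ n ih =>
    match xs, hn with
    | [], _ => simp [pvG, pvBGo]
    | c :: r, hn =>
      by_cases h : c = '?'
      · subst h
        have : pvG '?' r = pvBGo r := ih r.length (by simp at hn; omega) r rfl
        simp [pvG, pvBGo, this]
      · rw [pvG, pvBGo]
        simp only [if_neg h]
        rw [pvG_anchor c r, pvDrop_takeWhile, List.replicate_succ]
        simp only [List.cons_append]
        have hhead : (r.dropWhile (· = '?')).head? ≠ some '?' := by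
          have := List.head?_dropWhile_not (p := (· = '?')) (l := r)
          intro hc; rw [hc] at this; simp at this
        have hlen : (r.dropWhile (· = '?')).length < n := by
          have h1 : (r.dropWhile (· = '?')).length ≤ r.length :=
            List.length_dropWhile_le _ _
          simp at hn; omega
        rw [pvG_indep c '?' _ hhead, ih _ hlen _ rfl]

-- ===== VERDICT (by name: the statement is the Claim_ definition above) =====
theorem solve_line_first_spec : Claim_equal_solve_line_first := by
  intro l _
  unfold Spec_solve_line_first solve_line_first solve_line_first_alt
  rw [pvFold_eq_g, pvG_eq_bGo]
  rfl
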